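-- pv_equiv track=rewrite | github.com/Shah-Afraz411/Generalized-Traceability-Solution-for-Hierarchical-Relationships | services/relationship_service.py | fetch_downward
-- ===== SOURCE A (Python) =====
-- from typing import Dict, List, Set
-- from collections import defaultdict
--
-- def fetch_downward(graph: Dict[str, List[str]], element_id: str, levels: int) -> Dict[str, List[str]]:
--     result = defaultdict(list)
--     queue = [(element_id, 0)]
--     visited = set()
--
--     while queue:
--         current, current_level = queue.pop(0)
--         if current_level >= levels:
--             break
--         if current in graph:
--             for child in graph[current]:
--                 if child not in visited:
--                     visited.add(child)
--                     result[current_level].append(child)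
--                     queue.append((child, current_level + 1))
--
--     return result
-- ===== SOURCE B (Python) =====
-- from collections import defaultdict
--
-- def fetch_downward(graph, element_id, levels):
--     result = defaultdict(list)
--
--     def expand(frontier, seen, lvl):
--         if lvl >= levels or not frontier:
--             return
--         candidates = [c for node in frontier for c in graph.get(node, [])]
--         fresh = list(dict.fromkeys(c for c in candidates if c not in seen))
--         if fresh:
--             result[lvl] = fresh
--             expand(fresh, seen | set(fresh), lvl + 1)
--
--     expand([element_id], set(), 0)
--     return result
-- ===== Notes on version B (the rewrite author's own statement) =====
-- stated objective: alternative
-- what changed: Replaced the imperative while-loop over a queue of (node, level) tuples with per-child visited-set mutation by a recursive per-level pass that builds the whole candidate list by a comprehension, extracts the new nodes in one bulk dict.fromkeys dedup-filter, assigns result[lvl] wholesale and recurses with seen | set(fresh).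
import Mathlib
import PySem

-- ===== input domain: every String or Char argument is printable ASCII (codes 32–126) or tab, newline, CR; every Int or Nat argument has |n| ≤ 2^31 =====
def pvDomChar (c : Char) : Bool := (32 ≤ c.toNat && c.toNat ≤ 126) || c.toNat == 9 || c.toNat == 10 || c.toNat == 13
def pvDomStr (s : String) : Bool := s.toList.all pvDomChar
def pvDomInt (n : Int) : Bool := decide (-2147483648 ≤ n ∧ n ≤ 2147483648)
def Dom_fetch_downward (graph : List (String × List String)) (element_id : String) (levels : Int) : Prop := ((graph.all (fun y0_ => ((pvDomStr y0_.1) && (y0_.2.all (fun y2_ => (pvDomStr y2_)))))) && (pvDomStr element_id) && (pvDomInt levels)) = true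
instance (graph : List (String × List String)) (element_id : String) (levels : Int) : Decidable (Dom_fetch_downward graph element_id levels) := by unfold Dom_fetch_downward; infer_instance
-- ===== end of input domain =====

-- B replaces A's single (node, level) queue with pop(0)/break and per-child visited-set updates by a
-- recursive per-level pass: one bulk candidate list, one dedup-filter producing the whole level, one
-- wholesale result[lvl] assignment (objective: alternative decomposition).

-- ===== PORT A =====
-- per-child step of A's inner 'for child in graph[current]' loop: state (result, visited, queue)
def childStepA (lvl : Int) (st : PySem.Dict Int (List String) × PySem.Set String × List (String × Int)) (child : String) :
    PySem.Dict Int (List String) × PySem.Set String × List (String × Int) :=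
  if PySem.Set.contains st.2.1 child then st
  else (PySem.Dict.modify st.1 lvl [] (fun l => l ++ [child]), PySem.Set.add st.2.1 child, st.2.2 ++ [(child, lvl + 1)])

-- A's 'while queue' loop; the Nat argument is a fuel bound on the iteration count (each iteration pops one
-- queue entry, and at most 1 + (total number of child entries) entries are ever enqueued), not part of A's logic.
def aLoop (g : PySem.Dict String (List String)) (levels : Int) :
    Nat → PySem.Dict Int (List String) → PySem.Set String → List (String × Int) → PySem.Dict Int (List String)
  | _, result, _, [] => result
  | 0, result, _, _ => result
  | Nat.succ f, result, visited, (current, clvl) :: rest =>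
      if levels ≤ clvl then result
      else if PySem.Dict.contains g current then
        let st := (PySem.Dict.getD g current []).foldl (childStepA clvl) (result, visited, rest)
        aLoop g levels f st.1 st.2.1 st.2.2
      else aLoop g levels f result visited rest

def fetch_downward (graph : List (String × List String)) (element_id : String) (levels : Int) : List (Int × List String) :=
  (aLoop (PySem.Dict.mk graph) levels (1 + (graph.map (fun p => p.2.length)).sum)
    PySem.Dict.empty PySem.Set.empty [(element_id, 0)]).items

-- ===== PORT B =====
-- B's recursive 'expand(frontier, seen, lvl)'; the closure-mutated 'result' dict is threaded as a
-- parameter, and the Nat argument is fuel for the recursion depth (one level per call), not B's logic.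
def expandB (g : PySem.Dict String (List String)) (levels : Int) :
    Nat → List String → PySem.Set String → Int → PySem.Dict Int (List String) → PySem.Dict Int (List String)
  | 0, _, _, _, result => result
  | Nat.succ n, frontier, seen, lvl, result =>
      if levels ≤ lvl ∨ frontier = [] then result
      else
        let candidates := frontier.flatMap (fun node => PySem.Dict.getD g node [])
        let fresh := PySem.List.dedup (candidates.filter (fun c => !(PySem.Set.contains seen c)))
        if fresh = [] then result
        else expandB g levels n fresh (PySem.Set.union seen (PySem.Set.ofList fresh)) (lvl + 1)
               (PySem.Dict.insert result lvl fresh)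

def fetch_downward_alt (graph : List (String × List String)) (element_id : String) (levels : Int) : List (Int × List String) :=
  (expandB (PySem.Dict.mk graph) levels levels.toNat [element_id] PySem.Set.empty 0 PySem.Dict.empty).items

-- ===== PRECONDITION & SPEC =====
def Spec_fetch_downward (graph : List (String × List String)) (element_id : String) (levels : Int) (out : List (Int × List String)) : Prop := out = fetch_downward_alt graph element_id levels
instance (graph : List (String × List String)) (element_id : String) (levels : Int) (out : List (Int × List String)) : Decidable (Spec_fetch_downward graph element_id levels out) := by unfold Spec_fetch_downward; infer_instance

-- ===== CLAIM (what is proved, stated in full; the proofs are below) =====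
def Claim_equal_fetch_downward : Prop := ∀ (graph : List (String × List String)) (element_id : String) (levels : Int), Dom_fetch_downward graph element_id levels → Spec_fetch_downward graph element_id levels (fetch_downward graph element_id levels)

-- ===== LEMMAS AND PROOFS =====

-- Proof-side intermediate program: a frontier-by-frontier rendering of A's queue loop, used as the
-- bridge between A's queue and B's per-level bulk computation.
-- per-child step: state (result, visited, new_frontier)
def childStepB (lvl : Int) (st : PySem.Dict Int (List String) × PySem.Set String × List String) (child : String) :
    PySem.Dict Int (List String) × PySem.Set String × List String :=
  if PySem.Set.contains st.2.1 child then st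
  else (PySem.Dict.modify st.1 lvl [] (fun l => l ++ [child]), PySem.Set.add st.2.1 child, st.2.2 ++ [child])

def nodeStepB (g : PySem.Dict String (List String)) (lvl : Int) (st : PySem.Dict Int (List String) × PySem.Set String × List String) (node : String) :
    PySem.Dict Int (List String) × PySem.Set String × List String :=
  (PySem.Dict.getD g node []).foldl (childStepB lvl) st

-- level loop of the bridge program; Nat = remaining levels, Int = current level
def bLoop (g : PySem.Dict String (List String)) :
    Nat → Int → PySem.Dict Int (List String) × PySem.Set String × List String → PySem.Dict Int (List String) × PySem.Set String × List String
  | 0, _, st => st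
  | Nat.succ n, lvl, st =>
      if st.2.2 = [] then st
      else bLoop g n (lvl + 1) (st.2.2.foldl (nodeStepB g lvl) (st.1, st.2.1, []))

-- all children mentioned anywhere in the dict g
def allCh (g : PySem.Dict String (List String)) : List String := g.items.flatMap (fun p => p.2)

-- bound on the number of distinct children
def chBound (g : PySem.Dict String (List String)) : Nat := (PySem.List.dedup (allCh g)).length

theorem length_le_chBound (g : PySem.Dict String (List String)) (v : List String)
    (hnd : v.Nodup) (hsub : ∀ x ∈ v, x ∈ allCh g) : v.length ≤ chBound g :=
  (List.subperm_of_subset hnd (fun x hx => (PySem.List.mem_dedup _ _).2 (hsub x hx))).length_le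

-- A's inner child fold tracks the bridge's, with the queue = fixed prefix ++ level-tagged new frontier
theorem innerCorr (lvl : Int) (cs : List String) :
    ∀ (r : PySem.Dict Int (List String)) (v : PySem.Set String) (nf : List String) (P : List (String × Int)),
    cs.foldl (childStepA lvl) (r, v, P ++ nf.map (fun c => (c, lvl + 1)))
      = ((cs.foldl (childStepB lvl) (r, v, nf)).1,
         (cs.foldl (childStepB lvl) (r, v, nf)).2.1,
         P ++ ((cs.foldl (childStepB lvl) (r, v, nf)).2.2).map (fun c => (c, lvl + 1))) := by
  induction cs with
  | nil => intro r v nf P; rfl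
  | cons c cs ih =>
      intro r v nf P
      simp only [List.foldl_cons, childStepA, childStepB]
      by_cases h : PySem.Set.contains v c = true
      · rw [if_pos h, if_pos h]; exact ih r v nf P
      · rw [if_neg h, if_neg h]
        have hq : (P ++ nf.map (fun c => (c, lvl + 1))) ++ [(c, lvl + 1)]
            = P ++ ((nf ++ [c]).map (fun c => (c, lvl + 1))) := by simp
        show List.foldl (childStepA lvl)
            (PySem.Dict.modify r lvl [] (fun l => l ++ [c]), PySem.Set.add v c,
              (P ++ nf.map (fun c => (c, lvl + 1))) ++ [(c, lvl + 1)]) cs = _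
        rw [hq]
        exact ih (PySem.Dict.modify r lvl [] (fun l => l ++ [c])) (PySem.Set.add v c) (nf ++ [c]) P

-- bookkeeping: the child fold grows new_frontier and visited in lockstep, preserving the visited invariants
theorem foldInv (g : PySem.Dict String (List String)) (lvl : Int) (cs : List String) :
    ∀ (st : PySem.Dict Int (List String) × PySem.Set String × List String),
    (∀ c ∈ cs, c ∈ allCh g) → st.2.1.Nodup → (∀ x ∈ st.2.1, x ∈ allCh g) →
    (cs.foldl (childStepB lvl) st).2.2.length + st.2.1.length
        = st.2.2.length + (cs.foldl (childStepB lvl) st).2.1.length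
      ∧ (cs.foldl (childStepB lvl) st).2.1.Nodup
      ∧ (∀ x ∈ (cs.foldl (childStepB lvl) st).2.1, x ∈ allCh g) := by
  induction cs with
  | nil => intro st _ hnd hsub; exact ⟨rfl, hnd, hsub⟩
  | cons c cs ih =>
      intro st hcs hnd hsub
      simp only [List.foldl_cons, childStepB]
      by_cases h : PySem.Set.contains st.2.1 c = true
      · rw [if_pos h]
        exact ih st (fun x hx => hcs x (List.mem_cons_of_mem _ hx)) hnd hsub
      · rw [if_neg h]
        have hmem : c ∉ st.2.1 := by simpa [PySem.Set.contains] using h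
        have hadd : PySem.Set.add st.2.1 c = st.2.1 ++ [c] := by
          simp [PySem.Set.add, hmem]
        have hnd' : (st.2.1 ++ [c]).Nodup := by
          exact hnd.append (List.nodup_singleton _) (List.disjoint_singleton.2 hmem)
        have hsub' : ∀ x ∈ st.2.1 ++ [c], x ∈ allCh g := by
          intro x hx
          rcases List.mem_append.1 hx with hx | hx
          · exact hsub x hx
          · simp only [List.mem_singleton] at hx
            subst hx
            exact hcs _ (List.mem_cons_self ..)
        rw [hadd]
        obtain ⟨h1, h2, h3⟩ := ih (PySem.Dict.modify st.1 lvl [] (fun l => l ++ [c]), st.2.1 ++ [c], st.2.2 ++ [c])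
          (fun x hx => hcs x (List.mem_cons_of_mem _ hx)) hnd' hsub'
        refine ⟨?_, h2, h3⟩
        simp only [List.length_append, List.length_cons, List.length_nil] at h1 ⊢
        omega

theorem getD_sub_allCh (g : PySem.Dict String (List String)) (node : String) :
    ∀ c ∈ PySem.Dict.getD g node [], c ∈ allCh g := by
  intro c hc
  rw [PySem.Dict.getD_eq_get?_getD] at hc
  cases hget : PySem.Dict.get? g node with
  | none => rw [hget] at hc; simp at hc
  | some cs =>
      rw [hget] at hc
      exact List.mem_flatMap.2 ⟨(node, cs), PySem.Dict.mem_items_of_get?_eq_some g hget, hc⟩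

theorem bLoop_nil (g : PySem.Dict String (List String)) (n : Nat) (lvl : Int)
    (r : PySem.Dict Int (List String)) (v : PySem.Set String) :
    bLoop g n lvl (r, v, []) = (r, v, []) := by
  cases n <;> simp [bLoop]

-- one unfolding step of A's loop
theorem aLoop_cons (g : PySem.Dict String (List String)) (levels : Int) (f : Nat)
    (r : PySem.Dict Int (List String)) (v : PySem.Set String) (current : String) (clvl : Int)
    (rest : List (String × Int)) :
    aLoop g levels (f + 1) r v ((current, clvl) :: rest) =
      if levels ≤ clvl then r
      else if PySem.Dict.contains g current then
        (let st := (PySem.Dict.getD g current []).foldl (childStepA clvl) (r, v, rest)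
         aLoop g levels f st.1 st.2.1 st.2.2)
      else aLoop g levels f r v rest := rfl

-- simulation: A's queue loop from a mixed-level queue equals the bridge's remaining level loop
theorem aLoop_eq_bLoop (g : PySem.Dict String (List String)) (levels : Int) :
    ∀ (n : Nat) (L : Int) (cur nf : List String) (r : PySem.Dict Int (List String)) (v : PySem.Set String) (fuel : Nat),
    (levels - L).toNat = n →
    v.Nodup → (∀ x ∈ v, x ∈ allCh g) →
    cur.length + nf.length + chBound g ≤ fuel + v.length →
    aLoop g levels fuel r v (cur.map (fun c => (c, L)) ++ nf.map (fun c => (c, L + 1)))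
      = if levels ≤ L then r
        else (bLoop g ((levels - (L + 1)).toNat) (L + 1) (cur.foldl (nodeStepB g L) (r, v, nf))).1 := by
  intro n
  induction n with
  | zero =>
      intro L cur nf r v fuel hn _ _ _
      have hL : levels ≤ L := by omega
      rw [if_pos hL]
      cases cur with
      | cons c cur' =>
          cases fuel with
          | zero => simp [aLoop]
          | succ f => simp [aLoop, hL]
      | nil =>
          cases nf with
          | nil => cases fuel <;> simp [aLoop]
          | cons d nf' =>
              have hL' : levels ≤ L + 1 := by omega
              cases fuel with
              | zero => simp [aLoop]
              | succ f => simp [aLoop, hL']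
  | succ n ihn =>
      intro L cur
      induction cur with
      | nil =>
          intro nf r v fuel hn hndv hsubv hfuel
          have hL : ¬ levels ≤ L := by omega
          rw [if_neg hL]
          simp only [List.map_nil, List.nil_append, List.foldl_nil]
          have h2 : (levels - (L + 1)).toNat = n := by omega
          have hstep := ihn (L + 1) nf [] r v fuel h2 hndv hsubv (by simpa using hfuel)
          simp only [List.map_nil, List.append_nil] at hstep
          rw [hstep, h2]
          by_cases hL1 : levels ≤ L + 1
          · have hn0 : n = 0 := by omega
            subst hn0
            simp [bLoop, hL1]
          · obtain ⟨k, rfl⟩ : ∃ k, n = k + 1 := ⟨n - 1, by omega⟩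
            by_cases hnf : nf = []
            · subst hnf
              simp only [List.foldl_nil]
              rw [if_neg hL1, bLoop_nil]
              simp [bLoop]
            · have hk : (levels - (L + 1 + 1)).toNat = k := by omega
              rw [if_neg hL1, hk]
              conv_rhs => rw [bLoop]
              rw [if_neg (show ¬((r, v, nf) : PySem.Dict Int (List String) × PySem.Set String × List String).2.2 = [] from hnf)]
      | cons c cur' ihc =>
          intro nf r v fuel hn hndv hsubv hfuel
          have hL : ¬ levels ≤ L := by omega
          rw [if_neg hL]
          have hvD : v.length ≤ chBound g := length_le_chBound g v hndv hsubv
          obtain ⟨f, rfl⟩ : ∃ f, fuel = f + 1 := by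
            cases fuel with
            | zero =>
                exfalso
                simp only [List.length_cons] at hfuel
                omega
            | succ f => exact ⟨f, rfl⟩
          simp only [List.map_cons, List.cons_append]
          rw [aLoop_cons, if_neg hL]
          obtain ⟨hlen, hnd2, hsub2⟩ := foldInv g L (PySem.Dict.getD g c []) (r, v, nf)
            (getD_sub_allCh g c) hndv hsubv
          have hlen' : (List.foldl (childStepB L) (r, v, nf) (PySem.Dict.getD g c [])).2.2.length + v.length
              = nf.length + (List.foldl (childStepB L) (r, v, nf) (PySem.Dict.getD g c [])).2.1.length := hlen
          by_cases hc : PySem.Dict.contains g c = true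
          · rw [if_pos hc]
            simp only [innerCorr L (PySem.Dict.getD g c []) r v nf (cur'.map (fun c => (c, L)))]
            have happ := ihc ((PySem.Dict.getD g c []).foldl (childStepB L) (r, v, nf)).2.2
              ((PySem.Dict.getD g c []).foldl (childStepB L) (r, v, nf)).1
              ((PySem.Dict.getD g c []).foldl (childStepB L) (r, v, nf)).2.1
              f hn hnd2 hsub2
              (by simp only [List.length_cons] at hfuel; omega)
            simp only at happ ⊢
            rw [happ, if_neg hL]
            simp only [List.foldl_cons]
            rfl
          · rw [if_neg hc]
            have hcf : PySem.Dict.contains g c = false := by simpa using hc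
            have hget : PySem.Dict.getD g c [] = [] :=
              PySem.Dict.getD_of_not_contains g [] hcf
            have happ := ihc nf r v f hn hndv hsubv
              (by simp only [List.length_cons] at hfuel; omega)
            rw [happ, if_neg hL]
            simp only [List.foldl_cons]
            have : nodeStepB g L (r, v, nf) c = (r, v, nf) := by
              simp [nodeStepB, hget]
            rw [this]

-- A equals the bridge program
theorem A_eq_bLoop (graph : List (String × List String)) (element_id : String) (levels : Int) :
    fetch_downward graph element_id levels
      = (bLoop (PySem.Dict.mk graph) levels.toNat 0 (PySem.Dict.empty, PySem.Set.empty, [element_id])).1.items := by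
  unfold fetch_downward
  have hD : chBound (PySem.Dict.mk graph) ≤ (graph.map (fun p => p.2.length)).sum := by
    have h1 : (PySem.List.dedup (allCh (PySem.Dict.mk graph))).length ≤ (allCh (PySem.Dict.mk graph)).length :=
      (List.subperm_of_subset (PySem.List.nodup_dedup _)
        (fun x hx => (PySem.List.mem_dedup _ _).1 hx)).length_le
    have h2 : (allCh (PySem.Dict.mk graph)).length = (graph.map (fun p => p.2.length)).sum := by
      simp [allCh, List.length_flatMap]
    unfold chBound
    omega
  have hmain := aLoop_eq_bLoop (PySem.Dict.mk graph) levels ((levels - 0).toNat) 0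
      [element_id] [] PySem.Dict.empty PySem.Set.empty
      (1 + (graph.map (fun p => p.2.length)).sum) rfl
      (by simp [PySem.Set.empty])
      (by intro x hx; simp [PySem.Set.empty] at hx)
      (by simp [PySem.Set.empty]; omega)
  simp only [List.map_cons, List.map_nil, List.append_nil, List.foldl_cons, List.foldl_nil,
    zero_add] at hmain
  rw [hmain]
  by_cases h0 : levels ≤ 0
  · have ht : levels.toNat = 0 := by omega
    rw [if_pos h0, ht]
    rfl
  · obtain ⟨m, hm⟩ : ∃ m, levels.toNat = m + 1 := ⟨levels.toNat - 1, by omega⟩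
    have hm1 : (levels - 1).toNat = m := by omega
    rw [if_neg h0, hm, hm1]
    conv_rhs => rw [bLoop]
    rw [if_neg (show ¬((PySem.Dict.empty, PySem.Set.empty, [element_id]) :
        PySem.Dict Int (List String) × PySem.Set String × List String).2.2 = [] by simp)]
    rfl

-- ===== bridge → B =====

-- the sublist of new elements an incremental visited-set scan keeps, relative to forbidden set v
def pvFresh (v : List String) : List String → List String
  | [] => []
  | c :: cs => if c ∈ v then pvFresh v cs else c :: pvFresh (v ++ [c]) cs

theorem foldl_add_eq (l : List String) :
    ∀ (s : List String), l.foldl PySem.Set.add s = s ++ pvFresh s l := by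
  induction l with
  | nil => intro s; simp [pvFresh]
  | cons c cs ih =>
      intro s
      by_cases hc : c ∈ s
      · have : PySem.Set.add s c = s := by simp [PySem.Set.add, PySem.Set.contains, hc]
        simp only [List.foldl_cons, this, pvFresh, if_pos hc, ih]
      · have : PySem.Set.add s c = s ++ [c] := by simp [PySem.Set.add, PySem.Set.contains, hc]
        simp only [List.foldl_cons, this, pvFresh, if_neg hc, ih]
        simp

theorem pvFresh_not_mem (l : List String) :
    ∀ (v : List String) (x : String), x ∈ pvFresh v l → x ∉ v := by
  induction l with
  | nil => intro v x hx; simp [pvFresh] at hx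
  | cons c cs ih =>
      intro v x hx
      by_cases hc : c ∈ v
      · rw [pvFresh, if_pos hc] at hx; exact ih v x hx
      · rw [pvFresh, if_neg hc] at hx
        rcases List.mem_cons.1 hx with rfl | hx
        · exact hc
        · intro hv
          exact ih (v ++ [c]) x hx (List.mem_append.2 (Or.inl hv))

theorem pvFresh_nodup (l : List String) : ∀ (v : List String), (pvFresh v l).Nodup := by
  induction l with
  | nil => intro v; simp [pvFresh]
  | cons c cs ih =>
      intro v
      by_cases hc : c ∈ v
      · rw [pvFresh, if_pos hc]; exact ih v
      · rw [pvFresh, if_neg hc]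
        refine List.nodup_cons.2 ⟨?_, ih (v ++ [c])⟩
        intro hmem
        exact pvFresh_not_mem cs (v ++ [c]) c hmem (List.mem_append.2 (Or.inr (List.mem_singleton.2 rfl)))

theorem pvFresh_shift (l : List String) :
    ∀ (v u : List String), pvFresh (v ++ u) l = pvFresh u (l.filter (fun c => !(PySem.Set.contains v c))) := by
  induction l with
  | nil => intro v u; simp [pvFresh]
  | cons c cs ih =>
      intro v u
      simp only [List.filter_cons]
      by_cases hv : c ∈ v
      · rw [pvFresh, if_pos (List.mem_append.2 (Or.inl hv)),
            if_neg (show ¬((!(PySem.Set.contains v c)) = true) by simp [PySem.Set.contains, hv]), ih]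
      · rw [if_pos (show (!(PySem.Set.contains v c)) = true by simp [PySem.Set.contains, hv])]
        by_cases hu : c ∈ u
        · rw [pvFresh, if_pos (List.mem_append.2 (Or.inr hu)), pvFresh, if_pos hu, ih]
        · rw [pvFresh, if_neg (by simp [hv, hu]), pvFresh, if_neg hu]
          have : v ++ u ++ [c] = v ++ (u ++ [c]) := by simp
          rw [this, ih]

theorem dedup_eq_pvFresh (l : List String) : PySem.List.dedup l = pvFresh [] l := by
  show List.foldl PySem.Set.add [] l = pvFresh [] l
  rw [foldl_add_eq l []]
  rfl

theorem pvFresh_eq_dedup_filter (l v : List String) :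
    pvFresh v l = PySem.List.dedup (l.filter (fun c => !(PySem.Set.contains v c))) := by
  rw [dedup_eq_pvFresh, ← pvFresh_shift l v []]
  simp

theorem pvFresh_eq_self (l : List String) :
    ∀ (v : List String), l.Nodup → (∀ x ∈ l, x ∉ v) → pvFresh v l = l := by
  induction l with
  | nil => intro v _ _; rfl
  | cons c cs ih =>
      intro v hnd hdis
      rw [pvFresh, if_neg (hdis c (List.mem_cons_self ..))]
      congr 1
      refine ih (v ++ [c]) (List.nodup_cons.1 hnd).2 ?_
      intro x hx hmem
      rcases List.mem_append.1 hmem with h | h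
      · exact hdis x (List.mem_cons_of_mem _ hx) h
      · exact (List.nodup_cons.1 hnd).1 (List.mem_singleton.1 h ▸ hx)

-- Dict equality from items equality
theorem pvDictExt {κ ν : Type} (d e : PySem.Dict κ ν) (h : d.items = e.items) : d = e := by
  cases d; cases e; cases h; rfl

-- inserting twice at an absent key overwrites
theorem pvInsertInsert (r : PySem.Dict Int (List String)) (k : Int) (a b : List String)
    (hr : r.contains k = false) : (r.insert k a).insert k b = r.insert k b := by
  have hall : ∀ p ∈ r.items, (p.1 == k) = false := by
    intro p hp
    have := hr
    simp only [PySem.Dict.contains, List.any_eq_false] at this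
    simpa using this p hp
  apply pvDictExt
  rw [PySem.Dict.items_insert_of_contains _ b (PySem.Dict.contains_insert_self r k a),
      PySem.Dict.items_insert_of_not_contains _ a hr,
      PySem.Dict.items_insert_of_not_contains _ b hr]
  rw [List.map_append]
  congr 1
  · rw [List.map_congr_left (fun p hp => by rw [if_neg (by simp [hall p hp])])]
    simp
  · simp

theorem foldl_modify_insert (lvl : Int) (rest : List String) :
    ∀ (r : PySem.Dict Int (List String)) (acc : List String), r.contains lvl = false →
    rest.foldl (fun d c => PySem.Dict.modify d lvl [] (fun l => l ++ [c])) (r.insert lvl acc)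
      = r.insert lvl (acc ++ rest) := by
  induction rest with
  | nil => intro r acc _; simp
  | cons c cs ih =>
      intro r acc hr
      have hstep : PySem.Dict.modify (r.insert lvl acc) lvl [] (fun l => l ++ [c])
          = r.insert lvl (acc ++ [c]) := by
        show (r.insert lvl acc).insert lvl ((r.insert lvl acc).getD lvl [] ++ [c]) = _
        rw [PySem.Dict.getD_insert_self, pvInsertInsert r lvl acc _ hr]
      rw [List.foldl_cons, hstep, ih r (acc ++ [c]) hr]
      simp

theorem foldl_modify_of_fresh (lvl : Int) (f : List String) (r : PySem.Dict Int (List String))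
    (hr : r.contains lvl = false) (hne : f ≠ []) :
    f.foldl (fun d c => PySem.Dict.modify d lvl [] (fun l => l ++ [c])) r = r.insert lvl f := by
  cases f with
  | nil => exact absurd rfl hne
  | cons c cs =>
      have hstep : PySem.Dict.modify r lvl [] (fun l => l ++ [c]) = r.insert lvl [c] := by
        show r.insert lvl (r.getD lvl [] ++ [c]) = _
        rw [PySem.Dict.getD_of_not_contains r [] hr]
        rfl
      rw [List.foldl_cons, hstep, foldl_modify_insert lvl cs r [c] hr]
      rfl

-- the incremental child fold of the bridge equals one bulk pvFresh computation
theorem coreFold (lvl : Int) (cs : List String) :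
    ∀ (r : PySem.Dict Int (List String)) (v : PySem.Set String) (nf : List String),
    cs.foldl (childStepB lvl) (r, v, nf)
      = ((pvFresh v cs).foldl (fun d c => PySem.Dict.modify d lvl [] (fun l => l ++ [c])) r,
         v ++ pvFresh v cs, nf ++ pvFresh v cs) := by
  induction cs with
  | nil => intro r v nf; simp [pvFresh]
  | cons c cs ih =>
      intro r v nf
      by_cases hc : c ∈ v
      · have hcon : PySem.Set.contains v c = true := by simp [PySem.Set.contains, hc]
        simp only [List.foldl_cons, childStepB, if_pos hcon, pvFresh, if_pos hc]
        exact ih r v nf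
      · have hcon : ¬ PySem.Set.contains v c = true := by simp [PySem.Set.contains, hc]
        have hadd : PySem.Set.add v c = v ++ [c] := by simp [PySem.Set.add, PySem.Set.contains, hc]
        simp only [List.foldl_cons, childStepB, if_neg hcon, pvFresh, if_neg hc, hadd]
        rw [ih (PySem.Dict.modify r lvl [] (fun l => l ++ [c])) (v ++ [c]) (nf ++ [c])]
        simp

theorem nodeFold_flat (g : PySem.Dict String (List String)) (lvl : Int) (fr : List String) :
    ∀ (st : PySem.Dict Int (List String) × PySem.Set String × List String),
    fr.foldl (nodeStepB g lvl) st
      = (fr.flatMap (fun node => PySem.Dict.getD g node [])).foldl (childStepB lvl) st := by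
  induction fr with
  | nil => intro st; rfl
  | cons nd fr ih =>
      intro st
      rw [List.foldl_cons, List.flatMap_cons, List.foldl_append, ih]
      rfl

theorem union_fresh (v F : List String) (hnd : F.Nodup) (hdis : ∀ x ∈ F, x ∉ v) :
    PySem.Set.union v (PySem.Set.ofList F) = v ++ F := by
  have hofl : PySem.Set.ofList F = F := by
    show F.foldl PySem.Set.add PySem.Set.empty = F
    rw [foldl_add_eq F PySem.Set.empty]
    show ([] : List String) ++ pvFresh [] F = F
    rw [pvFresh_eq_self F [] hnd (by intro x _ h; simp at h)]
    simp
  show (PySem.Set.ofList F).foldl PySem.Set.add v = v ++ F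
  rw [hofl, foldl_add_eq F v, pvFresh_eq_self F v hnd hdis]

-- the bridge's level loop equals B's recursion
theorem bLoop_to_expand (g : PySem.Dict String (List String)) (levels : Int) :
    ∀ (n : Nat) (lvl : Int) (r : PySem.Dict Int (List String)) (v : PySem.Set String) (frontier : List String),
    (∀ p ∈ r.items, p.1 < lvl) → (levels - lvl).toNat = n →
    (bLoop g n lvl (r, v, frontier)).1 = expandB g levels n frontier v lvl r := by
  intro n
  induction n with
  | zero => intro lvl r v frontier _ _; rfl
  | succ n ih =>
      intro lvl r v frontier hr hn
      have hlt : ¬ levels ≤ lvl := by omega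
      by_cases hf : frontier = []
      · subst hf
        rw [bLoop, if_pos rfl, expandB, if_pos (Or.inr rfl)]
      · rw [bLoop, if_neg (show ¬((r, v, frontier) :
            PySem.Dict Int (List String) × PySem.Set String × List String).2.2 = [] from hf),
            expandB, if_neg (by push Not; exact ⟨by omega, hf⟩)]
        rw [nodeFold_flat g lvl frontier (r, v, [])]
        set cands := frontier.flatMap (fun node => PySem.Dict.getD g node []) with hcands
        rw [coreFold lvl cands r v []]
        have hFd : PySem.List.dedup (cands.filter (fun c => !(PySem.Set.contains v c))) = pvFresh v cands :=
          (pvFresh_eq_dedup_filter cands v).symm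
        simp only [hFd]
        by_cases hF : pvFresh v cands = []
        · rw [hF]
          simp only [List.foldl_nil, List.append_nil]
          rw [bLoop_nil]
          simp
        · rw [if_neg hF]
          have hcon : r.contains lvl = false := by
            by_contra hc
            have hc' : r.contains lvl = true := by
              cases h : r.contains lvl
              · exact absurd h hc
              · rfl
            simp only [PySem.Dict.contains, List.any_eq_true] at hc'
            obtain ⟨p, hp, hpk⟩ := hc'
            have : p.1 = lvl := by simpa using hpk
            have := hr p hp
            omega
          rw [foldl_modify_of_fresh lvl _ r hcon hF]
          rw [union_fresh v (pvFresh v cands) (pvFresh_nodup cands v) (fun x hx => pvFresh_not_mem cands v x hx)]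
          simp only [List.nil_append]
          refine ih (lvl + 1) (r.insert lvl (pvFresh v cands)) (v ++ pvFresh v cands) (pvFresh v cands) ?_ (by omega)
          intro p hp
          rw [PySem.Dict.items_insert_of_not_contains _ _ hcon] at hp
          rcases List.mem_append.1 hp with h | h
          · have := hr p h; omega
          · simp only [List.mem_singleton] at h
            subst h
            omega

-- ===== VERDICT (by name: the statement is the Claim_ definition above) =====
theorem fetch_downward_spec : Claim_equal_fetch_downward := by
  intro graph element_id levels _
  unfold Spec_fetch_downward fetch_downward_alt
  rw [A_eq_bLoop graph element_id levels]
  rw [bLoop_to_expand (PySem.Dict.mk graph) levels levels.toNat 0 PySem.Dict.empty PySem.Set.empty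
      [element_id] (by intro p hp; simp [PySem.Dict.empty] at hp) (by omega)]
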